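-- pv_equiv track=rewrite | github.com/kelueders/w8d2-TS | whiteboard.py | solution
-- ===== SOURCE A (Python) =====
-- def solution(arr):
--     gloves_dict = {}
--     num_pairs = 0
--
--     if len(arr) == 0:
--         return 0
--
--     for glove in arr:
--         if glove not in gloves_dict:
--             gloves_dict[glove] = 1
--         else:
--             gloves_dict[glove] += 1
--
--     for num in gloves_dict.values():
--         num_pairs += num // 2
--
--     return num_pairs
-- ===== SOURCE B (Python) =====
-- def solution(arr):
--     unpaired = set()
--     num_pairs = 0
--     for glove in arr:
--         if glove in unpaired:
--             unpaired.remove(glove)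
--             num_pairs += 1
--         else:
--             unpaired.add(glove)
--     return num_pairs
-- ===== Notes on version B (the rewrite author's own statement) =====
-- stated objective: simpler
-- what changed: Replaces A's two-phase count-dict-then-sum-halves with a single pass that tracks the set of currently-unpaired gloves, completing a pair whenever the current glove is already unpaired.
import Mathlib
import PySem

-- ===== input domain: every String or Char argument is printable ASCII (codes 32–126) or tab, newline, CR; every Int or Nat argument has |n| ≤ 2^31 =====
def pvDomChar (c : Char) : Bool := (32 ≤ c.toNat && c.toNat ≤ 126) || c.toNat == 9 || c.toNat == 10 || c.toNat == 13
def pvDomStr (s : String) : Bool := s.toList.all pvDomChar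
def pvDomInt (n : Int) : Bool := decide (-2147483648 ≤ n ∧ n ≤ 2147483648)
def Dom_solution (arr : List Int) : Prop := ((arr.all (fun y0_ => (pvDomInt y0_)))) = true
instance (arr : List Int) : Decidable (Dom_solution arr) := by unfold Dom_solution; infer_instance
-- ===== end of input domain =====

-- B replaces A's count-dict-then-sum-halves two-pass structure with a single pass
-- maintaining the set of currently-unpaired gloves (objective: simpler; return values proved equal).

-- ===== PORT A =====
def solution (arr : List Int) : Int :=
  let gloves_dict : PySem.Dict Int Int := PySem.Dict.empty
  let num_pairs : Int := 0
  if arr.length = 0 then 0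
  else
    let gloves_dict := arr.foldl (fun d glove =>
      if d.contains glove = false then d.insert glove 1
      else d.insert glove (d.getD glove 0 + 1)) gloves_dict
    gloves_dict.values.foldl (fun np num => np + PySem.Int.floordiv num 2) num_pairs

-- ===== PORT B =====
-- 'unpaired.remove(glove)' runs only after 'glove in unpaired' succeeded, so it is
-- exactly PySem.Set.discard there (no KeyError path).
def solution_alt (arr : List Int) : Int :=
  (arr.foldl (fun (st : PySem.Set Int × Int) glove =>
      if PySem.Set.contains st.1 glove then (PySem.Set.discard st.1 glove, st.2 + 1)
      else (PySem.Set.add st.1 glove, st.2)) (PySem.Set.empty, 0)).2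

-- ===== PRECONDITION & SPEC =====
def Spec_solution (arr : List Int) (out : Int) : Prop := out = solution_alt arr
instance (arr : List Int) (out : Int) : Decidable (Spec_solution arr out) := by unfold Spec_solution; infer_instance

-- ===== CLAIM (what is proved, stated in full; the proofs are below) =====
def Claim_equal_solution : Prop := ∀ (arr : List Int), Dom_solution arr → Spec_solution arr (solution arr)

-- ===== LEMMAS AND PROOFS =====

-- common reference value: sum over the distinct elements of arr of count//2
def pairSum (l : List Int) : Int :=
  ((PySem.Set.ofList l).map (fun k => ((l.count k / 2 : Nat) : Int))).sum

lemma count_append_self (l : List Int) (x : Int) : (l ++ [x]).count x = l.count x + 1 := by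
  simp

lemma count_append_ne (l : List Int) (x y : Int) (h : y ≠ x) :
    (l ++ [x]).count y = l.count y := by
  simp [List.count_append, Ne.symm h]

lemma sum_map_update (x : Int) (f g : Int → Int) :
    ∀ (ks : List Int), ks.Nodup → x ∈ ks → (∀ y ∈ ks, y ≠ x → g y = f y) → g x = f x + 1 →
    (ks.map g).sum = (ks.map f).sum + 1 := by
  intro ks
  induction ks with
  | nil => simp
  | cons a t ih =>
    intro hnd hx hoff hgx
    rcases List.mem_cons.mp hx with rfl | hxt
    · have : ∀ y ∈ t, g y = f y := by
        intro y hy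
        exact hoff y (List.mem_cons_of_mem _ hy) (fun h => (List.nodup_cons.mp hnd).1 (h ▸ hy))
      simp [List.map_congr_left this, hgx]; ring
    · have hax : a ≠ x := fun h => (List.nodup_cons.mp hnd).1 (h ▸ hxt)
      have := ih (List.nodup_cons.mp hnd).2 hxt
        (fun y hy hne => hoff y (List.mem_cons_of_mem _ hy) hne) hgx
      simp [this, hoff a (List.mem_cons_self) hax]; ring

lemma pairSum_append_odd (l : List Int) (x : Int) (hodd : l.count x % 2 = 1) :
    pairSum (l ++ [x]) = pairSum l + 1 := by
  have hxl : x ∈ l := List.count_pos_iff.mp (by omega : 0 < l.count x)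
  have hset : PySem.Set.ofList (l ++ [x]) = PySem.Set.ofList l := by
    rw [PySem.Set.ofList_append_singleton,
        PySem.Set.add_of_mem ((PySem.Set.mem_ofList l x).mpr hxl)]
  unfold pairSum
  rw [hset]
  apply sum_map_update x _ _ _ (PySem.Set.nodup_ofList l) ((PySem.Set.mem_ofList l x).mpr hxl)
  · intro y _ hy
    rw [count_append_ne l x y hy]
  · rw [count_append_self l x]
    have h2 : (l.count x + 1) / 2 = l.count x / 2 + 1 := by omega
    rw [h2]; push_cast; ring

lemma pairSum_append_even (l : List Int) (x : Int) (heven : l.count x % 2 = 0) :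
    pairSum (l ++ [x]) = pairSum l := by
  unfold pairSum
  rw [PySem.Set.ofList_append_singleton, PySem.Set.add_eq_ite]
  have hcong : ∀ k ∈ PySem.Set.ofList l,
      (((l ++ [x]).count k / 2 : Nat) : Int) = ((l.count k / 2 : Nat) : Int) := by
    intro k _
    by_cases hk : k = x
    · subst hk
      rw [count_append_self l k]
      have h2 : (l.count k + 1) / 2 = l.count k / 2 := by omega
      rw [h2]
    · rw [count_append_ne l x k hk]
  by_cases hx : x ∈ PySem.Set.ofList l
  · simp only [hx, if_true]
    exact congrArg List.sum (List.map_congr_left hcong)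
  · simp only [hx, if_false]
    have hxl : x ∉ l := fun h => hx ((PySem.Set.mem_ofList l x).mpr h)
    have hcx : (l ++ [x]).count x = 1 := by
      rw [count_append_self l x, List.count_eq_zero_of_not_mem hxl]
    rw [List.map_append, List.sum_append]
    simp only [List.map_cons, List.map_nil, hcx]
    rw [List.map_congr_left hcong]
    simp

-- the single-pass loop invariant: the carried set is the odd-count elements, the counter is pairSum
lemma alt_invariant (l : List Int) :
    (l.foldl (fun (st : PySem.Set Int × Int) glove =>
        if PySem.Set.contains st.1 glove then (PySem.Set.discard st.1 glove, st.2 + 1)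
        else (PySem.Set.add st.1 glove, st.2)) (PySem.Set.empty, 0)).1.Nodup ∧
    (∀ y, y ∈ (l.foldl (fun (st : PySem.Set Int × Int) glove =>
        if PySem.Set.contains st.1 glove then (PySem.Set.discard st.1 glove, st.2 + 1)
        else (PySem.Set.add st.1 glove, st.2)) (PySem.Set.empty, 0)).1 ↔ l.count y % 2 = 1) ∧
    (l.foldl (fun (st : PySem.Set Int × Int) glove =>
        if PySem.Set.contains st.1 glove then (PySem.Set.discard st.1 glove, st.2 + 1)
        else (PySem.Set.add st.1 glove, st.2)) (PySem.Set.empty, 0)).2 = pairSum l := by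
  induction l using List.reverseRecOn with
  | nil => simp [PySem.Set.empty, pairSum, PySem.Set.ofList]
  | append_singleton l x ih =>
    obtain ⟨hnd, hmem, hsum⟩ := ih
    rw [List.foldl_append] at *
    set st := l.foldl (fun (st : PySem.Set Int × Int) glove =>
        if PySem.Set.contains st.1 glove then (PySem.Set.discard st.1 glove, st.2 + 1)
        else (PySem.Set.add st.1 glove, st.2)) (PySem.Set.empty, 0) with hst
    simp only [List.foldl_cons, List.foldl_nil]
    by_cases hx : x ∈ st.1
    · have hodd : l.count x % 2 = 1 := (hmem x).mp hx
      rw [if_pos ((PySem.Set.contains_iff st.1 x).mpr hx)]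
      refine ⟨PySem.Set.nodup_discard _ _ hnd, ?_, ?_⟩
      · intro y
        rw [PySem.Set.mem_discard, hmem y]
        by_cases hy : y = x
        · subst hy
          rw [count_append_self l y]
          simp; omega
        · rw [count_append_ne l x y hy]
          simp [hy]
      · rw [hsum, pairSum_append_odd l x hodd]
    · have heven : l.count x % 2 = 0 := by
        have := (hmem x).not.mp hx; omega
      rw [if_neg (fun h => hx ((PySem.Set.contains_iff st.1 x).mp h))]
      refine ⟨PySem.Set.nodup_add _ _ hnd, ?_, ?_⟩
      · intro y
        rw [PySem.Set.mem_add, hmem y]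
        by_cases hy : y = x
        · subst hy
          rw [count_append_self l y]
          simp; omega
        · rw [count_append_ne l x y hy]
          simp [hy]
      · rw [hsum, pairSum_append_even l x heven]

lemma alt_eq_pairSum (arr : List Int) : solution_alt arr = pairSum arr :=
  (alt_invariant arr).2.2

lemma a_eq_pairSum (arr : List Int) : solution arr = pairSum arr := by
  unfold solution
  by_cases h : arr.length = 0
  · rw [if_pos h]
    rw [List.length_eq_zero_iff.mp h]
    simp [pairSum, PySem.Set.ofList]
  · rw [if_neg h]
    have hfold : arr.foldl (fun (d : PySem.Dict Int Int) glove =>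
        if d.contains glove = false then d.insert glove 1
        else d.insert glove (d.getD glove 0 + 1)) PySem.Dict.empty
        = arr.foldl (fun (d : PySem.Dict Int Int) x => d.insert x (d.getD x 0 + 1)) PySem.Dict.empty := by
      apply PySem.List.foldl_congr_mem
      intro d x _
      by_cases hc : d.contains x
      · simp [hc]
      · have hc' : d.contains x = false := by simpa using hc
        rw [if_pos (by simp [hc']), PySem.Dict.getD_of_not_contains d 0 hc']
        norm_num
    rw [hfold, PySem.Dict.foldl_insert_getD_add_one_eq_counter]
    have hvals : (PySem.Dict.counter arr).values
        = (PySem.Set.ofList arr).map (fun k => ((arr.count k : Nat) : Int)) := by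
      show ((PySem.Dict.counter arr).items).map (·.2) = _
      rw [PySem.Dict.items_counter]
      simp [List.map_map, Function.comp_def]
    show ((PySem.Dict.counter arr).values).foldl (fun np num => np + PySem.Int.floordiv num 2) 0 = pairSum arr
    rw [hvals, PySem.List.foldl_add]
    unfold pairSum
    rw [List.map_map, zero_add]
    apply congrArg List.sum
    apply List.map_congr_left
    intro k _
    simp only [Function.comp_def]
    exact_mod_cast PySem.Int.floordiv_natCast (arr.count k) 2

-- ===== VERDICT (by name: the statement is the Claim_ definition above) =====
theorem solution_spec : Claim_equal_solution := by
  intro arr _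
  unfold Spec_solution
  rw [a_eq_pairSum, alt_eq_pairSum]
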